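-- pv_equiv track=rewrite | github.com/aryan23141/game-theory-equilibrium-solverr | 2023141_AryanBundela_dmmrs.py | weakly_dominated_strategies
-- ===== SOURCE A (Python) =====
-- def weakly_dominated_strategies(allpermut,util_matrix,player_count,strategy):
--
--
--
--
--     finalarray = [[] for _ in range(player_count)]
--
--     for i in range(player_count):
--
--
--         comparray = [[] for _ in range(strategy[i])]
--
--         for j in range(strategy[i]):
--
--
--
--             indexes = []
--             for k in range(len(allpermut)):
--
--
--                 if allpermut[k][i] == j:
--
--
--                     indexes.append(allpermut[k])
--
--             for l in range(len(indexes)):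
--
--
--                 comparray[j].append(util_matrix[tuple(indexes[l])][i])
--
--         for m in range(len(comparray)):
--
--
--
--             howmany = 0
--             for n in range(len(comparray)):
--
--
--                 if m == n:
--                     continue
--                 forall = 0
--
--
--                 for o in range(len(comparray[m])):
--                     if comparray[m][o] >= comparray[n][o]:
--
--
--                         forall += 1
--                 if forall == len(comparray[m]):
--
--
--                     howmany += 1
--
--             if howmany == len(comparray) - 1:
--
--
--                 finalarray[i].append(m)
--
--     return finalarray
-- ===== SOURCE B (Python) =====
-- def weakly_dominated_strategies(allpermut, util_matrix, player_count, strategy):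
--     finalarray = []
--     for i in range(player_count):
--         # one pass over allpermut: bucket each permutation's utility for player i
--         # under its strategy index, instead of rescanning allpermut per strategy
--         buckets = [[] for _ in range(strategy[i])]
--         if buckets:
--             for perm in allpermut:
--                 j = perm[i]
--                 if 0 <= j < len(buckets):
--                     buckets[j].append(util_matrix[tuple(perm)][i])
--         winners = [m for m in range(len(buckets))
--                    if all(m == n or all(x >= y for x, y in zip(buckets[m], buckets[n]))
--                           for n in range(len(buckets)))]
--         finalarray.append(winners)
--     return finalarray
-- ===== Notes on version B (the rewrite author's own statement) =====
-- stated objective: simpler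
-- what changed: B replaces A's per-strategy rescans of allpermut (strategy[i] passes, each building an indexes list and then a second indexed pass over it) by a single bucketing pass over allpermut per player, and replaces A's counter-based dominance test (forall/howmany counters) by direct all()/zip comprehensions.
import Mathlib
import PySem

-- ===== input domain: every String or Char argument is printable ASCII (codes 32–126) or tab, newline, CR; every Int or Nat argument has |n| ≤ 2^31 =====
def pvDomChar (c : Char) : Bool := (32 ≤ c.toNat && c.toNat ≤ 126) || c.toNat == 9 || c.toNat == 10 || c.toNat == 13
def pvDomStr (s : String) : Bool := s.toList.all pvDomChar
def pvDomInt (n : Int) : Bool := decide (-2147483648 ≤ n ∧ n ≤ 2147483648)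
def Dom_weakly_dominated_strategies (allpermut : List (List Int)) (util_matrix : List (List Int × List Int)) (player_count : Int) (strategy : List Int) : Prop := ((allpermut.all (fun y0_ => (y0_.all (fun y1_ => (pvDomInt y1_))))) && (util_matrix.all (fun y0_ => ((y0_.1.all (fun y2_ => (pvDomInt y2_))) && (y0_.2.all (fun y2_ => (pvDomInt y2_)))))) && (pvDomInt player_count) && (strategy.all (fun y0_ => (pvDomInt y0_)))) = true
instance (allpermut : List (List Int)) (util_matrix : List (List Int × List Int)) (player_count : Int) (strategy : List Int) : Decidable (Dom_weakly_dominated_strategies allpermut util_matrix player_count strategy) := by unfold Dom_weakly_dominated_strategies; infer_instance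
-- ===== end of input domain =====

-- ===== PORT A =====
-- B is a structurally different re-implementation: one bucketing pass over allpermut per
-- player instead of A's per-strategy rescans, and all/zip dominance tests instead of counters.
-- shared 1-line helper: util_matrix[tuple(p)][i] (both Pythons contain this exact expression)
def pvUtil (util_matrix : List (List Int × List Int)) (p : List Int) (i : Int) : Int :=
  PySem.List.pyGetD (PySem.Dict.getD (PySem.Dict.mk util_matrix) p []) i 0

def weakly_dominated_strategies (allpermut : List (List Int)) (util_matrix : List (List Int × List Int)) (player_count : Int) (strategy : List Int) : List (List Int) :=
  let finalarray : List (List Int) := (PySem.List.pyRange 0 player_count 1).map (fun _ => [])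
  (PySem.List.pyRange 0 player_count 1).foldl (fun finalarray i =>
    let comparray0 : List (List Int) :=
      (PySem.List.pyRange 0 (PySem.List.pyGetD strategy i 0) 1).map (fun _ => [])
    let comparray :=
      (PySem.List.pyRange 0 (PySem.List.pyGetD strategy i 0) 1).foldl (fun comparray j =>
        let indexes :=
          (PySem.List.pyRange 0 (PySem.List.len allpermut) 1).foldl (fun indexes k =>
            if PySem.List.pyGetD (PySem.List.pyGetD allpermut k []) i 0 = j then
              indexes ++ [PySem.List.pyGetD allpermut k []]
            else indexes) []
        (PySem.List.pyRange 0 (PySem.List.len indexes) 1).foldl (fun comparray l =>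
          PySem.List.pySetD comparray j
            (PySem.List.pyGetD comparray j [] ++ [pvUtil util_matrix (PySem.List.pyGetD indexes l []) i]))
          comparray) comparray0
    (PySem.List.pyRange 0 (PySem.List.len comparray) 1).foldl (fun finalarray m =>
      let howmany :=
        (PySem.List.pyRange 0 (PySem.List.len comparray) 1).foldl (fun howmany n =>
          if m = n then howmany
          else
            let forall_ :=
              (PySem.List.pyRange 0 (PySem.List.len (PySem.List.pyGetD comparray m [])) 1).foldl
                (fun forall_ o =>
                  if PySem.List.pyGetD (PySem.List.pyGetD comparray m []) o 0 ≥
                     PySem.List.pyGetD (PySem.List.pyGetD comparray n []) o 0 then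
                    forall_ + 1
                  else forall_) (0 : Int)
            if forall_ = PySem.List.len (PySem.List.pyGetD comparray m []) then howmany + 1
            else howmany) (0 : Int)
      if howmany = PySem.List.len comparray - 1 then
        PySem.List.pySetD finalarray i (PySem.List.pyGetD finalarray i [] ++ [m])
      else finalarray) finalarray) finalarray

-- ===== PORT B =====
def weakly_dominated_strategies_alt (allpermut : List (List Int)) (util_matrix : List (List Int × List Int)) (player_count : Int) (strategy : List Int) : List (List Int) :=
  (PySem.List.pyRange 0 player_count 1).foldl (fun finalarray i =>
    let buckets0 : List (List Int) :=
      (PySem.List.pyRange 0 (PySem.List.pyGetD strategy i 0) 1).map (fun _ => [])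
    let buckets :=
      if buckets0 = [] then buckets0
      else
        allpermut.foldl (fun buckets perm =>
          let j := PySem.List.pyGetD perm i 0
          if 0 ≤ j ∧ j < PySem.List.len buckets then
            PySem.List.pySetD buckets j
              (PySem.List.pyGetD buckets j [] ++ [pvUtil util_matrix perm i])
          else buckets) buckets0
    let winners :=
      (PySem.List.pyRange 0 (PySem.List.len buckets) 1).filter (fun m =>
        (PySem.List.pyRange 0 (PySem.List.len buckets) 1).all (fun n =>
          m == n ||
          ((PySem.List.pyGetD buckets m []).zip (PySem.List.pyGetD buckets n [])).all
            (fun xy => xy.1 ≥ xy.2)))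
    finalarray ++ [winners]) []

-- ===== PRECONDITION & SPEC =====
-- Pre_ holds exactly on the inputs where the Python A returns normally: player_count within
-- range of strategy, every permutation long enough for each active player, every permutation
-- whose i-th entry is an in-range strategy index present in util_matrix with a long-enough
-- utility list, and for each player all strategy indices matched by equally many permutations
-- (otherwise A's comparray rows have unequal lengths and comparray[n][o] raises IndexError).
def Pre_weakly_dominated_strategies (allpermut : List (List Int)) (util_matrix : List (List Int × List Int)) (player_count : Int) (strategy : List Int) : Prop :=
  (0 < player_count → player_count ≤ (strategy.length : Int)) ∧
  ∀ i < player_count.toNat,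
    (0 < strategy.getD i 0 → ∀ p ∈ allpermut, i < p.length) ∧
    (∀ p ∈ allpermut, 0 ≤ p.getD i 0 → p.getD i 0 < strategy.getD i 0 →
      (PySem.Dict.mk util_matrix).contains p = true ∧
      i < ((PySem.Dict.mk util_matrix).getD p []).length) ∧
    (∀ j < (strategy.getD i 0).toNat,
      allpermut.countP (fun p => p.getD i 0 == (j : Int)) =
      allpermut.countP (fun p => p.getD i 0 == 0))
instance (allpermut : List (List Int)) (util_matrix : List (List Int × List Int)) (player_count : Int) (strategy : List Int) : Decidable (Pre_weakly_dominated_strategies allpermut util_matrix player_count strategy) := by unfold Pre_weakly_dominated_strategies; infer_instance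

def pvWitness_weakly_dominated_strategies : List (List Int) × (List (List Int × List Int)) × Int × List Int :=
  ([[0, 0], [0, 1], [1, 0], [1, 1]],
   [([0, 0], [3, 3]), ([0, 1], [1, 2]), ([1, 0], [2, 1]), ([1, 1], [0, 0])],
   2, [2, 2])

def Spec_weakly_dominated_strategies (allpermut : List (List Int)) (util_matrix : List (List Int × List Int)) (player_count : Int) (strategy : List Int) (out : List (List Int)) : Prop := out = weakly_dominated_strategies_alt allpermut util_matrix player_count strategy
instance (allpermut : List (List Int)) (util_matrix : List (List Int × List Int)) (player_count : Int) (strategy : List Int) (out : List (List Int)) : Decidable (Spec_weakly_dominated_strategies allpermut util_matrix player_count strategy out) := by unfold Spec_weakly_dominated_strategies; infer_instance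

-- ===== CLAIM (what is proved, stated in full; the proofs are below) =====
def Claim_equal_weakly_dominated_strategies : Prop := ∀ (allpermut : List (List Int)) (util_matrix : List (List Int × List Int)) (player_count : Int) (strategy : List Int), Dom_weakly_dominated_strategies allpermut util_matrix player_count strategy → Pre_weakly_dominated_strategies allpermut util_matrix player_count strategy → Spec_weakly_dominated_strategies allpermut util_matrix player_count strategy (weakly_dominated_strategies allpermut util_matrix player_count strategy)

-- ===== LEMMAS AND PROOFS =====

-- canonical per-player comparray/buckets value: row j lists the utilities of the
-- permutations whose i-th entry is j, in allpermut order
def pvC (allpermut : List (List Int)) (util_matrix : List (List Int × List Int)) (strategy : List Int) (i : Nat) : List (List Int) :=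
  (List.range ((strategy.getD i 0).toNat)).map (fun (j : Nat) =>
    (allpermut.filter (fun p => decide (PySem.List.pyGetD p (i : Int) 0 = (j : Int)))).map
      (fun p => pvUtil util_matrix p (i : Int)))

-- B's winners expression as a function of the bucket matrix
def pvWin (C : List (List Int)) : List Int :=
  (PySem.List.pyRange 0 (PySem.List.len C) 1).filter (fun m =>
    (PySem.List.pyRange 0 (PySem.List.len C) 1).all (fun n =>
      m == n ||
      ((PySem.List.pyGetD C m []).zip (PySem.List.pyGetD C n [])).all (fun xy => xy.1 ≥ xy.2)))

lemma pv_map_getD_range {α : Type} (xs : List α) (d : α) :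
    (List.range xs.length).map (fun k => xs.getD k d) = xs := by
  apply List.ext_getElem
  · simp
  · intro i h1 h2
    simp [List.getElem?_eq_getElem h2]

lemma pv_map_getD_map {α β : Type} (xs : List α) (d : α) (g : α → β) :
    (List.range xs.length).map (fun k => g (xs.getD k d)) = xs.map g := by
  conv_rhs => rw [← pv_map_getD_range xs d]
  rw [List.map_map]
  rfl

lemma pv_slot_fold {α : Type} (f : α → Int) (j : Nat) (L : List α) (c : List (List Int)) :
    L.foldl (fun c x => c.set j (c.getD j [] ++ [f x])) c =
    c.set j (c.getD j [] ++ L.map f) := by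
  induction L generalizing c with
  | nil =>
    simp only [List.foldl_nil, List.map_nil, List.append_nil]
    by_cases hj : j < c.length
    · rw [List.getD_eq_getElem _ _ hj, List.set_getElem_self]
    · rw [List.set_eq_of_length_le (by omega)]
  | cons x L ih =>
    simp only [List.foldl_cons, List.map_cons, ih]
    by_cases hj : j < c.length
    · simp [hj, List.getElem_set_self, List.set_set]
    · have hc1 : c.set j (c.getD j [] ++ [f x]) = c := List.set_eq_of_length_le (by omega)
      rw [hc1, List.set_eq_of_length_le (by omega), List.set_eq_of_length_le (by omega)]

lemma pv_set_slots_aux {γ : Type} (F : Nat → List γ → List γ) (n : Nat) :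
    ∀ t, t ≤ n →
    (List.range t).foldl (fun arr j => arr.set j (F j (arr.getD j [])))
      (List.replicate n ([] : List γ)) =
    (List.range t).map (fun j => F j []) ++ List.replicate (n - t) [] := by
  intro t
  induction t with
  | zero => simp
  | succ t ih =>
    intro ht
    rw [List.range_succ, List.foldl_append, ih (by omega)]
    simp only [List.foldl_cons, List.foldl_nil]
    have hA : (List.map (fun j => F j []) (List.range t)).length = t := by simp
    have hrep : List.replicate (n - t) ([] : List γ) = [] :: List.replicate (n - (t + 1)) [] := by
      rw [show n - t = (n - (t + 1)) + 1 by omega, List.replicate_succ]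
    rw [hrep]
    have hget : ((List.map (fun j => F j []) (List.range t)) ++ [] :: List.replicate (n - (t + 1)) ([] : List γ)).getD t [] = [] := by
      rw [List.getD_eq_getElem _ _ (by simp [hA]), List.getElem_append_right (by omega)]
      simp [hA]
    rw [hget, List.set_append_right _ _ (by omega), hA, Nat.sub_self, List.set_cons_zero,
      List.map_append, List.append_assoc]
    simp

lemma pv_set_slots {γ : Type} (F : Nat → List γ → List γ) (n : Nat) :
    (List.range n).foldl (fun arr j => arr.set j (F j (arr.getD j [])))
      (List.replicate n ([] : List γ)) =
    (List.range n).map (fun j => F j []) := by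
  rw [pv_set_slots_aux F n n (le_refl n)]
  simp

lemma pv_indexes_eq (ap : List (List Int)) (gi : List Int → Int) (j : Int) :
    (PySem.List.pyRange 0 (PySem.List.len ap) 1).foldl (fun idx k =>
      if gi (PySem.List.pyGetD ap k []) = j then idx ++ [PySem.List.pyGetD ap k []] else idx) [] =
    ap.filter (fun p => decide (gi p = j)) := by
  rw [PySem.List.pyRange_zero]
  simp only [PySem.List.len_eq, Int.toNat_natCast, List.foldl_map, PySem.List.pyGetD_natCast]
  rw [PySem.List.foldl_append_ite (p := fun (k : Nat) => gi (ap.getD k []) = j) (f := fun (k : Nat) => ap.getD k [])]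
  conv_rhs => rw [← pv_map_getD_range ap []]
  rw [List.filter_map]
  rfl

lemma pv_buckets_eq (ap : List (List Int)) (u : List Int → Int) (gi : List Int → Int) (s : Nat) :
    ap.foldl (fun b perm =>
        if 0 ≤ gi perm ∧ gi perm < PySem.List.len b then
          PySem.List.pySetD b (gi perm) (PySem.List.pyGetD b (gi perm) [] ++ [u perm])
        else b)
      ((List.range s).map (fun _ => ([] : List Int))) =
    (List.range s).map (fun (j : Nat) => (ap.filter (fun p => decide (gi p = (j : Int)))).map u) := by
  induction ap using List.reverseRecOn with
  | nil => simp
  | append_singleton l p ih =>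
    rw [List.foldl_append, ih]
    simp only [List.foldl_cons, List.foldl_nil]
    have hlen : PySem.List.len ((List.range s).map (fun (j : Nat) => (l.filter (fun p => decide (gi p = (j : Int)))).map u)) = (s : Int) := by
      simp [PySem.List.len_eq]
    rw [hlen]
    by_cases hin : 0 ≤ gi p ∧ gi p < (s : Int)
    · rw [if_pos hin]
      obtain ⟨h0, hs⟩ := hin
      have hjn : (gi p).toNat < s := by omega
      have hcast : gi p = ((gi p).toNat : Int) := by omega
      rw [hcast]
      simp only [PySem.List.pySetD_natCast, PySem.List.pyGetD_natCast]
      apply List.ext_getElem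
      · simp
      · intro k h1 h2
        simp only [List.length_set, List.length_map, List.length_range] at h1
        rw [List.getElem_set]
        simp only [List.getElem_map, List.getElem_range]
        rw [List.filter_append]
        by_cases hk : (gi p).toNat = k
        · rw [if_pos hk]
          rw [List.getD_eq_getElem _ _ (by simp [hjn])]
          simp only [List.getElem_map, List.getElem_range]
          rw [← hk]
          have hp : List.filter (fun q => decide (gi q = (((gi p).toNat : Nat) : Int))) [p] = [p] := by
            simp [← hcast]
          rw [hp]
          simp
        · rw [if_neg hk]
          have hp : List.filter (fun q => decide (gi q = ((k : Nat) : Int))) [p] = [] := by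
            simp only [List.filter_cons, List.filter_nil, decide_eq_true_eq]
            rw [if_neg]
            intro hE
            rw [hE] at hcast
            exact hk (by omega)
          rw [hp, List.append_nil]
    · rw [if_neg hin]
      apply List.map_congr_left
      intro k hk
      simp only [List.mem_range] at hk
      rw [List.filter_append]
      have hp : List.filter (fun q => decide (gi q = ((k : Nat) : Int))) [p] = [] := by
        simp only [List.filter_cons, List.filter_nil, decide_eq_true_eq]
        rw [if_neg]
        intro hE
        apply hin
        constructor
        · rw [hE]; omega
        · rw [hE]; exact_mod_cast hk
      rw [hp, List.append_nil]

lemma pv_foldl_skip (m : Int) (g : Int → Int → Int) (l : List Int) (a : Int) :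
    l.foldl (fun h n => if m = n then h else g h n) a =
    (l.filter (fun n => decide (¬ m = n))).foldl g a := by
  rw [← PySem.List.foldl_ite_eq_foldl_filter (p := fun n => ¬ m = n)]
  apply PySem.List.foldl_congr_mem
  intro acc x _
  by_cases h : m = x <;> simp [h]

lemma pv_zip_all_ge (a b : List Int) :
    ((a.zip b).all (fun xy => xy.1 ≥ xy.2) = true) ↔
    ∀ k, k < a.length → k < b.length → b.getD k 0 ≤ a.getD k 0 := by
  induction a generalizing b with
  | nil => simp
  | cons x a ih =>
    cases b with
    | nil => simp
    | cons y b =>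
      simp only [List.zip_cons_cons, List.all_cons, Bool.and_eq_true, ih]
      constructor
      · rintro ⟨h1, h2⟩ k hk1 hk2
        match k with
        | 0 => simpa using h1
        | (k+1) =>
          simp only [List.getD_cons_succ]
          exact h2 k (Nat.lt_of_succ_lt_succ hk1) (Nat.lt_of_succ_lt_succ hk2)
      · intro h
        exact ⟨by simpa using h 0 (Nat.succ_pos _) (Nat.succ_pos _),
          fun k hk1 hk2 => by simpa using h (k+1) (Nat.succ_lt_succ hk1) (Nat.succ_lt_succ hk2)⟩

lemma pv_dom (C : List (List Int)) (c0 : Nat) (hrows : ∀ r ∈ C, r.length = c0) :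
    (PySem.List.pyRange 0 (PySem.List.len C) 1).filter (fun m => decide
      ((PySem.List.pyRange 0 (PySem.List.len C) 1).foldl (fun howmany n =>
          if m = n then howmany
          else
            if (PySem.List.pyRange 0 (PySem.List.len (PySem.List.pyGetD C m [])) 1).foldl
                (fun forall_ o =>
                  if PySem.List.pyGetD (PySem.List.pyGetD C m []) o 0 ≥
                     PySem.List.pyGetD (PySem.List.pyGetD C n []) o 0 then forall_ + 1
                  else forall_) (0 : Int) =
               PySem.List.len (PySem.List.pyGetD C m []) then howmany + 1
            else howmany) (0 : Int) =
        PySem.List.len C - 1)) = pvWin C := by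
  unfold pvWin
  simp only [PySem.List.len_eq]
  apply List.filter_congr
  intro m hm
  obtain ⟨hm0, hmlt⟩ := (PySem.List.mem_pyRange_one).1 hm
  rw [Bool.eq_iff_iff, decide_eq_true_eq, List.all_eq_true]
  simp only [pv_foldl_skip, PySem.List.foldl_ite_add_one]
  have key : ∀ n ∈ PySem.List.pyRange 0 ((C.length : Int)) 1,
      (((0 : Int) + (↑(List.countP (fun o => decide (PySem.List.pyGetD (PySem.List.pyGetD C m []) o 0 ≥
            PySem.List.pyGetD (PySem.List.pyGetD C n []) o 0))
          (PySem.List.pyRange 0 (((PySem.List.pyGetD C m []).length : Int)) 1)) : Int) =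
        (((PySem.List.pyGetD C m []).length : Int))))
      ↔ (((PySem.List.pyGetD C m []).zip (PySem.List.pyGetD C n [])).all (fun xy => decide (xy.1 ≥ xy.2)) = true) := by
    intro n hn
    obtain ⟨hn0, hnlt⟩ := (PySem.List.mem_pyRange_one).1 hn
    have hCm : PySem.List.pyGetD C m [] = C[m.toNat] :=
      PySem.List.pyGetD_eq_getElem _ _ hm0 (by omega)
    have hCn : PySem.List.pyGetD C n [] = C[n.toNat] :=
      PySem.List.pyGetD_eq_getElem _ _ hn0 (by omega)
    have hlm : C[m.toNat].length = c0 := hrows _ (List.getElem_mem _)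
    have hln : C[n.toNat].length = c0 := hrows _ (List.getElem_mem _)
    rw [hCm, hCn, pv_zip_all_ge, PySem.List.pyRange_zero, Int.toNat_natCast, List.countP_map]
    simp only [Function.comp_def, PySem.List.pyGetD_natCast]
    have hle := List.countP_le_length
      (p := fun (o : Nat) => decide (C[m.toNat].getD o 0 ≥ C[n.toNat].getD o 0))
      (l := List.range C[m.toNat].length)
    rw [List.length_range] at hle
    constructor
    · intro h k hk1 hk2
      have hc : List.countP (fun (o : Nat) => decide (C[m.toNat].getD o 0 ≥ C[n.toNat].getD o 0))
          (List.range C[m.toNat].length) = (List.range C[m.toNat].length).length := by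
        rw [List.length_range]; omega
      have := List.countP_eq_length.1 hc k (by rw [List.mem_range]; exact hk1)
      simpa using this
    · intro h
      have hc : List.countP (fun (o : Nat) => decide (C[m.toNat].getD o 0 ≥ C[n.toNat].getD o 0))
          (List.range C[m.toNat].length) = (List.range C[m.toNat].length).length := by
        apply List.countP_eq_length.2
        intro o ho
        rw [List.mem_range] at ho
        simpa using h o ho (by omega)
      rw [hc, List.length_range]
      omega
  have hflen : ((PySem.List.pyRange 0 ((C.length : Int)) 1).filter (fun n => decide (¬ m = n))).length = C.length - 1 := by
    have he : ((PySem.List.pyRange 0 ((C.length : Int)) 1).filter (fun n => decide (¬ m = n))) =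
        (PySem.List.pyRange 0 ((C.length : Int)) 1).erase m := by
      rw [List.Nodup.erase_eq_filter (PySem.List.nodup_pyRange_one 0 ((C.length : Int))) m]
      apply List.filter_congr
      intro n _
      rcases eq_or_ne m n with he | he
      · subst he; simp
      · simp [bne_iff_ne, he, Ne.symm he]
    rw [he, List.length_erase_of_mem hm, PySem.List.length_pyRange_one]
    omega
  constructor
  · intro h n hn
    by_cases hmn : m = n
    · simp [hmn]
    · have hq : List.countP (fun x => decide ((0 : Int) +
      (↑(List.countP (fun o => decide (PySem.List.pyGetD (PySem.List.pyGetD C m []) o 0 ≥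
          PySem.List.pyGetD (PySem.List.pyGetD C x []) o 0))
        (PySem.List.pyRange 0 (((PySem.List.pyGetD C m []).length : Int)) 1)) : Int) =
      (((PySem.List.pyGetD C m []).length : Int))))
          ((PySem.List.pyRange 0 ((C.length : Int)) 1).filter (fun n => decide (¬ m = n))) =
          ((PySem.List.pyRange 0 ((C.length : Int)) 1).filter (fun n => decide (¬ m = n))).length := by
        rw [hflen]
        omega
      have hmem := List.countP_eq_length.1 hq n (List.mem_filter.2 ⟨hn, by simp [hmn]⟩)
      rw [decide_eq_true_eq] at hmem
      have hz := (key n hn).1 hmem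
      simp [hz]
  · intro h
    have hall : ∀ x ∈ (PySem.List.pyRange 0 ((C.length : Int)) 1).filter (fun n => decide (¬ m = n)),
        (fun x => decide ((0 : Int) +
      (↑(List.countP (fun o => decide (PySem.List.pyGetD (PySem.List.pyGetD C m []) o 0 ≥
          PySem.List.pyGetD (PySem.List.pyGetD C x []) o 0))
        (PySem.List.pyRange 0 (((PySem.List.pyGetD C m []).length : Int)) 1)) : Int) =
      (((PySem.List.pyGetD C m []).length : Int)))) x = true := by
      intro n hn
      obtain ⟨hnR, hne⟩ := List.mem_filter.1 hn
      have hx := h n hnR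
      rw [Bool.or_eq_true] at hx
      rcases hx with hbeq | hz
      · rw [decide_eq_true_eq] at hne
        exact absurd (by simpa using hbeq) hne
      · rw [decide_eq_true_eq]
        exact (key n hnR).2 hz
    rw [List.countP_eq_length.2 hall, hflen]
    omega

lemma pv_comparray_eq (ap : List (List Int)) (um : List (List Int × List Int)) (st : List Int) (i : Nat) :
    (PySem.List.pyRange 0 (PySem.List.pyGetD st (i : Int) 0) 1).foldl (fun comparray j =>
        (PySem.List.pyRange 0 (PySem.List.len
            ((PySem.List.pyRange 0 (PySem.List.len ap) 1).foldl (fun indexes k =>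
              if PySem.List.pyGetD (PySem.List.pyGetD ap k []) (i : Int) 0 = j then
                indexes ++ [PySem.List.pyGetD ap k []]
              else indexes) [])) 1).foldl (fun comparray l =>
          PySem.List.pySetD comparray j
            (PySem.List.pyGetD comparray j [] ++
              [pvUtil um (PySem.List.pyGetD
                ((PySem.List.pyRange 0 (PySem.List.len ap) 1).foldl (fun indexes k =>
                  if PySem.List.pyGetD (PySem.List.pyGetD ap k []) (i : Int) 0 = j then
                    indexes ++ [PySem.List.pyGetD ap k []]
                  else indexes) []) l []) (i : Int)]))
          comparray)
      ((PySem.List.pyRange 0 (PySem.List.pyGetD st (i : Int) 0) 1).map (fun _ => [])) =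
    pvC ap um st i := by
  simp only [pv_indexes_eq ap (fun p => PySem.List.pyGetD p (i : Int) 0)]
  simp only [PySem.List.pyRange_zero, List.foldl_map, List.map_map, PySem.List.len_eq,
    Int.toNat_natCast, PySem.List.pyGetD_natCast, PySem.List.pySetD_natCast]
  simp only [pv_slot_fold]
  have hinit : List.map ((fun (_ : Int) => ([] : List Int)) ∘ fun (k : Nat) => ((k : Int))) (List.range (st.getD i 0).toNat) = List.replicate (st.getD i 0).toNat [] := by
    simp [Function.comp_def, List.map_const']
  rw [hinit]
  rw [pv_set_slots (F := fun jk init => init ++ (List.range (List.filter (fun p => decide (p.getD i 0 = (jk : Int))) ap).length).map (fun lk => pvUtil um ((List.filter (fun p => decide (p.getD i 0 = (jk : Int))) ap).getD lk []) (i : Int)))]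
  unfold pvC
  apply List.map_congr_left
  intro jk hjk
  simp only [List.nil_append, PySem.List.pyGetD_natCast]
  rw [pv_map_getD_map _ _ (fun p => pvUtil um p (i : Int))]

lemma pv_B_eq (ap : List (List Int)) (um : List (List Int × List Int)) (pc : Int) (st : List Int) :
    weakly_dominated_strategies_alt ap um pc st =
    (List.range pc.toNat).map (fun i => pvWin (pvC ap um st i)) := by
  unfold weakly_dominated_strategies_alt
  rw [PySem.List.pyRange_zero]
  simp only [List.foldl_map]
  rw [PySem.List.foldl_append_singleton_eq_map]
  rw [List.nil_append]
  apply List.map_congr_left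
  intro ik hik
  simp only [PySem.List.pyGetD_natCast]
  have hb : (if List.map (fun (_ : Int) => ([] : List Int)) (PySem.List.pyRange 0 (st.getD ik 0) 1) = [] then
        List.map (fun (_ : Int) => ([] : List Int)) (PySem.List.pyRange 0 (st.getD ik 0) 1)
      else
        List.foldl
          (fun buckets perm =>
            if 0 ≤ perm.getD ik 0 ∧ perm.getD ik 0 < PySem.List.len buckets then
              PySem.List.pySetD buckets (perm.getD ik 0)
                (PySem.List.pyGetD buckets (perm.getD ik 0) [] ++ [pvUtil um perm (ik : Int)])
            else buckets)
          (List.map (fun (_ : Int) => ([] : List Int)) (PySem.List.pyRange 0 (st.getD ik 0) 1)) ap) =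
      pvC ap um st ik := by
    have hb0 : List.map (fun (_ : Int) => ([] : List Int)) (PySem.List.pyRange 0 (st.getD ik 0) 1) =
        (List.range (st.getD ik 0).toNat).map (fun _ => []) := by
      rw [PySem.List.pyRange_zero, List.map_map]
      rfl
    by_cases hs : (st.getD ik 0).toNat = 0
    · rw [if_pos (by rw [hb0, hs]; simp)]
      rw [hb0, hs]
      unfold pvC
      rw [hs]
      simp
    · rw [if_neg (by rw [hb0]; simp only [List.map_eq_nil_iff, List.range_eq_nil]; omega)]
      rw [hb0, pv_buckets_eq ap (fun perm => pvUtil um perm (ik : Int)) (fun perm => perm.getD ik 0) ((st.getD ik 0).toNat)]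
      unfold pvC
      simp only [PySem.List.pyGetD_natCast]
  rw [hb]
  rfl

lemma pv_A_eq (ap : List (List Int)) (um : List (List Int × List Int)) (pc : Int) (st : List Int)
    (hpre : Pre_weakly_dominated_strategies ap um pc st) :
    weakly_dominated_strategies ap um pc st =
    (List.range pc.toNat).map (fun i => pvWin (pvC ap um st i)) := by
  obtain ⟨hpc, hpre2⟩ := hpre
  unfold weakly_dominated_strategies
  rw [PySem.List.pyRange_zero]
  simp only [List.foldl_map, List.map_map]
  have hinit : List.map ((fun (_ : Int) => ([] : List Int)) ∘ fun (k : Nat) => ((k : Int)))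
      (List.range pc.toNat) = List.replicate pc.toNat [] := by
    simp [Function.comp_def, List.map_const']
  rw [hinit]
  simp only [pv_comparray_eq]
  have hstep : ∀ (fa : List (List Int)) (ik : Nat), ik ∈ List.range pc.toNat →
      (PySem.List.pyRange 0 (PySem.List.len (pvC ap um st ik)) 1).foldl (fun fa m =>
        if (PySem.List.pyRange 0 (PySem.List.len (pvC ap um st ik)) 1).foldl (fun howmany n =>
            if m = n then howmany
            else
              if (PySem.List.pyRange 0 (PySem.List.len (PySem.List.pyGetD (pvC ap um st ik) m [])) 1).foldl
                  (fun forall_ o =>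
                    if PySem.List.pyGetD (PySem.List.pyGetD (pvC ap um st ik) m []) o 0 ≥
                       PySem.List.pyGetD (PySem.List.pyGetD (pvC ap um st ik) n []) o 0 then forall_ + 1
                    else forall_) (0 : Int) =
                 PySem.List.len (PySem.List.pyGetD (pvC ap um st ik) m []) then howmany + 1
              else howmany) (0 : Int) =
          PySem.List.len (pvC ap um st ik) - 1 then
          PySem.List.pySetD fa (ik : Int) (PySem.List.pyGetD fa (ik : Int) [] ++ [m])
        else fa) fa =
      fa.set ik (fa.getD ik [] ++ pvWin (pvC ap um st ik)) := by
    intro fa ik hik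
    rw [List.mem_range] at hik
    obtain ⟨hlong, hkey, hcnt⟩ := hpre2 ik hik
    have hrows : ∀ r ∈ pvC ap um st ik, r.length = ap.countP (fun p => p.getD ik 0 == (0 : Int)) := by
      intro r hr
      unfold pvC at hr
      rw [List.mem_map] at hr
      obtain ⟨j, hj, hrj⟩ := hr
      rw [List.mem_range] at hj
      rw [← hrj, List.length_map, ← List.countP_eq_length_filter]
      rw [← hcnt j hj]
      apply List.countP_congr
      intro p _
      simp [PySem.List.pyGetD_natCast]
    rw [PySem.List.foldl_ite_eq_foldl_filter
      (p := fun m => (PySem.List.pyRange 0 (PySem.List.len (pvC ap um st ik)) 1).foldl (fun howmany n =>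
            if m = n then howmany
            else
              if (PySem.List.pyRange 0 (PySem.List.len (PySem.List.pyGetD (pvC ap um st ik) m [])) 1).foldl
                  (fun forall_ o =>
                    if PySem.List.pyGetD (PySem.List.pyGetD (pvC ap um st ik) m []) o 0 ≥
                       PySem.List.pyGetD (PySem.List.pyGetD (pvC ap um st ik) n []) o 0 then forall_ + 1
                    else forall_) (0 : Int) =
                 PySem.List.len (PySem.List.pyGetD (pvC ap um st ik) m []) then howmany + 1
              else howmany) (0 : Int) =
          PySem.List.len (pvC ap um st ik) - 1)
      (f := fun fa m => PySem.List.pySetD fa (ik : Int) (PySem.List.pyGetD fa (ik : Int) [] ++ [m]))]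
    simp only [PySem.List.pySetD_natCast, PySem.List.pyGetD_natCast]
    rw [pv_slot_fold (f := fun (m : Int) => m)]
    rw [List.map_id']
    rw [pv_dom (pvC ap um st ik) (ap.countP (fun p => p.getD ik 0 == (0 : Int))) hrows]
  rw [PySem.List.foldl_congr_mem (List.range pc.toNat) _
    (fun fa ik => fa.set ik (fa.getD ik [] ++ pvWin (pvC ap um st ik)))
    (List.replicate pc.toNat []) hstep]
  rw [pv_set_slots (F := fun ik init => init ++ pvWin (pvC ap um st ik))]
  apply List.map_congr_left
  intro ik _
  rw [List.nil_append]

-- ===== VERDICT (by name: the statement is the Claim_ definition above) =====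
theorem weakly_dominated_strategies_spec : Claim_equal_weakly_dominated_strategies := by
  intro ap um pc st _hdom hpre
  unfold Spec_weakly_dominated_strategies
  rw [pv_A_eq ap um pc st hpre, pv_B_eq]
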